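-- pv_equiv track=rewrite | github.com/rosinaSav/DFE_paper_repo | nucleotide_comp.py | get_longest_run
-- ===== SOURCE A (Python) =====
-- def get_longest_run(motifs):
--     '''
--     Given a set of motifs, calculate how long is the longest mononucleotide
--     run that you observe with each of the four DNA bases.
--     '''
--     max_motif_length = max([len(i) for i in motifs])
--     bases_dict = {i: [] for i in ["A", "T", "C", "G"]}
--     for base in bases_dict:
--         for length in range(0, max_motif_length + 1):
--             current_run = "".join([base for i in range(length)])
--             for motif in motifs:
--                 if current_run in motif:
--                     bases_dict[base].append(length)
--         bases_dict[base] = max(bases_dict[base])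
--     return(bases_dict)
-- ===== SOURCE B (Python) =====
-- def get_longest_run(motifs):
--     '''
--     Given a set of motifs, calculate how long is the longest mononucleotide
--     run that you observe with each of the four DNA bases.
--     '''
--     result = {}
--     for base in "ATCG":
--         best = 0
--         for motif in motifs:
--             cur = 0
--             for ch in motif:
--                 if ch == base:
--                     cur += 1
--                     if cur > best:
--                         best = cur
--                 else:
--                     cur = 0
--         result[base] = best
--     return result
-- ===== Notes on version B (the rewrite author's own statement) =====
-- stated objective: faster
-- what changed: Instead of generating every candidate run string of each length up to the longest motif and substring-searching every motif for it, B makes one linear scan per motif per base, counting maximal consecutive runs and keeping the running maximum.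
import Mathlib
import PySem

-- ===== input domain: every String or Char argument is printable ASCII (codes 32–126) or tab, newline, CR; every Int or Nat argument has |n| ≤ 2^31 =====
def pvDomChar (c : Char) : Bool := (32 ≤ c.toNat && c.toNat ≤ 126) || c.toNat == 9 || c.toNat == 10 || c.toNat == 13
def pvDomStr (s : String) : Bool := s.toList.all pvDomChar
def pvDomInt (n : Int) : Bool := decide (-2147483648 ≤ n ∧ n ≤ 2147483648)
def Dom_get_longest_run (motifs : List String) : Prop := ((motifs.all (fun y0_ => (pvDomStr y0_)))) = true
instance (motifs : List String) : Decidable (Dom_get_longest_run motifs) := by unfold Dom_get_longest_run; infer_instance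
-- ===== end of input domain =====

-- B replaces A's per-length substring search with one linear run-counting scan per motif per base (asymptotically faster; A raises ValueError on an empty motif list, excluded by Pre_).


-- ===== PORT A =====
def get_longest_run (motifs : List String) : List (String × Int) :=
  match PySem.List.max? (motifs.map (fun i => PySem.Str.len i)) (fun x => x) with
  | none => []   -- Python: max([]) raises ValueError; these inputs are excluded by Pre_
  | some max_motif_length =>
    ["A", "T", "C", "G"].map (fun base =>
      let lens : List Int :=
        (PySem.List.pyRange 0 (max_motif_length + 1) 1).foldl (fun acc length =>
          let current_run := PySem.Str.join "" ((PySem.List.pyRange 0 length 1).map (fun _ => base))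
          motifs.foldl (fun acc2 motif =>
            if PySem.Str.isIn current_run motif then acc2 ++ [length] else acc2) acc) []
      (base, (PySem.List.max? lens (fun x => x)).getD 0))

-- ===== PORT B =====
def get_longest_run_alt (motifs : List String) : List (String × Int) :=
  (["A", "T", "C", "G"].foldl (fun (result : PySem.Dict String Int) base =>
      let best := motifs.foldl (fun best motif =>
          (motif.toList.foldl (fun (st : Int × Int) ch =>
              if String.ofList [ch] == base then
                let cur := st.1 + 1
                (cur, if cur > st.2 then cur else st.2)
              else (0, st.2)) (0, best)).2) 0
      result.insert base best) PySem.Dict.empty).items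

-- ===== PRECONDITION & SPEC =====
-- Pre_ excludes only the empty motif list, on which A's max([len(i) for i in motifs]) raises ValueError.
def Pre_get_longest_run (motifs : List String) : Prop := motifs ≠ []
instance (motifs : List String) : Decidable (Pre_get_longest_run motifs) := by unfold Pre_get_longest_run; infer_instance
def pvWitness_get_longest_run : List String := (["GAATTC", "AAAC"])

def Spec_get_longest_run (motifs : List String) (out : List (String × Int)) : Prop := out = get_longest_run_alt motifs
instance (motifs : List String) (out : List (String × Int)) : Decidable (Spec_get_longest_run motifs out) := by unfold Spec_get_longest_run; infer_instance

-- ===== CLAIM (what is proved, stated in full; the proofs are below) =====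
def Claim_equal_get_longest_run : Prop := ∀ (motifs : List String), Dom_get_longest_run motifs → Pre_get_longest_run motifs → Spec_get_longest_run motifs (get_longest_run motifs)
-- ===== LEMMAS AND PROOFS =====

-- length of the leading run of c's
def pvLead (c : Char) (l : List Char) : Nat := (l.takeWhile (fun x => x == c)).length

-- length of the longest run of c's (max over all suffixes of the leading run)
def pvMR (c : Char) : List Char → Nat
  | [] => 0
  | x :: xs => max (pvLead c (x :: xs)) (pvMR c xs)

theorem pvLead_cons (c x : Char) (xs : List Char) :
    pvLead c (x :: xs) = if x = c then pvLead c xs + 1 else 0 := by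
  by_cases h : x = c <;> simp [pvLead, h]

theorem pvLead_cons_self (c : Char) (xs : List Char) : pvLead c (c :: xs) = pvLead c xs + 1 := by
  simp [pvLead_cons]

theorem pvMR_cons (c x : Char) (xs : List Char) :
    pvMR c (x :: xs) = max (pvLead c (x :: xs)) (pvMR c xs) := rfl

theorem pvLead_le_MR (c : Char) (l : List Char) : pvLead c l ≤ pvMR c l := by
  cases l with
  | nil => simp [pvLead]
  | cons x xs => simp [pvMR]

theorem pvMR_le_length (c : Char) (l : List Char) : pvMR c l ≤ l.length := by
  induction l with
  | nil => simp [pvMR]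
  | cons x xs ih =>
    have h : pvLead c (x :: xs) ≤ (x :: xs).length := (List.takeWhile_sublist _).length_le
    simp only [pvMR, max_le_iff]
    exact ⟨h, ih.trans (by simp)⟩

theorem pvReplicate_prefix_iff (n : Nat) (c : Char) (l : List Char) :
    List.replicate n c <+: l ↔ n ≤ pvLead c l := by
  induction n generalizing l with
  | zero => simp
  | succ n ih =>
    cases l with
    | nil => simp [List.replicate_succ, pvLead]
    | cons x xs =>
      by_cases h : x = c
      · simp [List.replicate_succ, List.cons_prefix_cons, ih, pvLead_cons, h]
      · simp only [List.replicate_succ, List.cons_prefix_cons, pvLead_cons, if_neg h]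
        constructor
        · rintro ⟨hc, -⟩; exact absurd hc.symm h
        · omega
  
theorem pvReplicate_infix_iff (n : Nat) (c : Char) (l : List Char) :
    List.replicate n c <:+: l ↔ n ≤ pvMR c l := by
  induction l with
  | nil => simp [pvMR, List.replicate_eq_nil_iff]
  | cons x xs ih =>
    rw [List.infix_cons_iff, pvReplicate_prefix_iff, ih]
    simp only [pvMR]
    omega

-- the B-side character scan computes the longest run
theorem pvScan_eq (c : Char) (base : String) (hb : base = String.ofList [c]) (l : List Char)
    (a b : Int) (ha : 0 ≤ a) (hab : a ≤ b) :
    (l.foldl (fun (st : Int × Int) ch =>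
        if String.ofList [ch] == base then
          (st.1 + 1, if st.1 + 1 > st.2 then st.1 + 1 else st.2)
        else (0, st.2)) (a, b)).2
      = max b (max (a + (pvLead c l : Int)) (pvMR c l : Int)) := by
  subst hb
  induction l generalizing a b with
  | nil =>
    simp only [List.foldl_nil, pvLead, pvMR, List.takeWhile_nil, List.length_nil]
    omega
  | cons x xs ih =>
    have hle := pvLead_le_MR c xs
    simp only [List.foldl_cons]
    by_cases h : x = c
    · subst h
      rw [if_pos (by simp)]
      rw [ih (a + 1) (if a + 1 > b then a + 1 else b) (by omega) (by split <;> omega)]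
      rw [pvMR_cons, pvLead_cons_self]
      push_cast
      split <;> omega
    · rw [if_neg (by simpa [String.ofList_inj] using h)]
      rw [ih 0 b le_rfl (by omega)]
      rw [pvMR_cons, pvLead_cons, if_neg h]
      push_cast
      omega

-- B's per-base motif loop is the running maximum of pvMR
theorem pvMotifFold (c : Char) (base : String) (hb : base = String.ofList [c])
    (motifs : List String) (b0 : Int) (h0 : 0 ≤ b0) :
    motifs.foldl (fun best motif =>
        (motif.toList.foldl (fun (st : Int × Int) ch =>
            if String.ofList [ch] == base then
              (st.1 + 1, if st.1 + 1 > st.2 then st.1 + 1 else st.2)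
            else (0, st.2)) (0, best)).2) b0
      = motifs.foldl (fun b m => max b ((pvMR c m.toList : Int))) b0 := by
  induction motifs generalizing b0 with
  | nil => rfl
  | cons m ms ih =>
    simp only [List.foldl_cons]
    rw [pvScan_eq c base hb m.toList 0 b0 le_rfl h0]
    have hle : (pvLead c m.toList : Int) ≤ (pvMR c m.toList : Int) := by
      exact_mod_cast pvLead_le_MR c m.toList
    have : max b0 (max (0 + (pvLead c m.toList : Int)) (pvMR c m.toList : Int))
        = max b0 (pvMR c m.toList : Int) := by omega
    rw [this, ih _ (by positivity)]

-- the running maximum is attained (or stays at its seed)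
theorem pvFoldMax_attained (c : Char) (motifs : List String) (b0 : Int) :
    motifs.foldl (fun b m => max b ((pvMR c m.toList : Int))) b0 = b0 ∨
      ∃ m ∈ motifs, motifs.foldl (fun b m => max b ((pvMR c m.toList : Int))) b0
        = (pvMR c m.toList : Int) := by
  induction motifs generalizing b0 with
  | nil => simp
  | cons m ms ih =>
    simp only [List.foldl_cons]
    rcases ih (max b0 (pvMR c m.toList : Int)) with h | ⟨m', hm', h⟩
    · rw [h]
      rcases le_total b0 (pvMR c m.toList : Int) with hle | hle
      · exact Or.inr ⟨m, by simp, by omega⟩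
      · exact Or.inl (by omega)
    · exact Or.inr ⟨m', by simp [hm'], h⟩

-- A's candidate run string is a replicate
theorem pvRun_toList (c : Char) (base : String) (hb : base = String.ofList [c])
    (L : Int) (_hL : 0 ≤ L) :
    (PySem.Str.join "" ((PySem.List.pyRange 0 L 1).map (fun _ => base))).toList
      = List.replicate L.toNat c := by
  subst hb
  rw [PySem.Str.toList_join]
  have h1 : (((PySem.List.pyRange 0 L 1).map (fun _ => String.ofList [c])).map String.toList)
      = List.replicate L.toNat [c] := by
    simp only [List.map_map]
    have h2 : ∀ u : List Int, u.map (String.toList ∘ fun _ => String.ofList [c])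
        = List.replicate u.length [c] := by
      intro u
      induction u with
      | nil => simp
      | cons y ys ihh => simp [List.replicate_succ, ihh]
    rw [h2, PySem.List.length_pyRange_one]
    norm_num
  rw [h1]
  have h3 := PySem.Chars.join_nil_singletons (List.replicate L.toNat c)
  rw [List.map_replicate] at h3
  simpa using h3

-- the A-side per-base computation equals the running maximum of pvMR
theorem pvBase_eq (motifs : List String) (hm : motifs ≠ []) (maxLen : Int)
    (hmax : PySem.List.max? (motifs.map (fun i => PySem.Str.len i)) (fun x => x) = some maxLen)
    (c : Char) (base : String) (hb : base = String.ofList [c]) :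
    (PySem.List.max? ((PySem.List.pyRange 0 (maxLen + 1) 1).foldl (fun acc length =>
        motifs.foldl (fun acc2 motif =>
          if PySem.Str.isIn (PySem.Str.join "" ((PySem.List.pyRange 0 length 1).map (fun _ => base))) motif
          then acc2 ++ [length] else acc2) acc) []) (fun x => x)).getD 0
      = motifs.foldl (fun b m => max b ((pvMR c m.toList : Int))) 0 := by
  set Best : Int := motifs.foldl (fun b m => max b ((pvMR c m.toList : Int))) 0 with hBest
  have hBest0 : 0 ≤ Best := (PySem.List.le_foldl_max_int motifs _ 0).1
  -- every motif's length is ≤ maxLen, and maxLen ≥ 0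
  have hub : ∀ m ∈ motifs, (m.toList.length : Int) ≤ maxLen := by
    intro m hmm
    have := PySem.List.max?_isMax hmax (PySem.Str.len m) (by exact List.mem_map_of_mem hmm)
    simpa [PySem.Str.len_eq] using this
  have h0max : 0 ≤ maxLen := by
    have hmem := PySem.List.max?_mem hmax
    rcases List.mem_map.1 hmem with ⟨i, -, hi⟩
    rw [← hi, PySem.Str.len_eq]
    positivity
  have hBestLe : Best ≤ maxLen := by
    rcases pvFoldMax_attained c motifs 0 with h | ⟨m, hmm, h⟩
    · omega
    · rw [hBest, h]
      calc ((pvMR c m.toList : Int)) ≤ (m.toList.length : Int) := by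
            exact_mod_cast pvMR_le_length c m.toList
        _ ≤ maxLen := hub m hmm
  -- rewrite the nested foldl into a flatMap
  rw [show (fun (acc : List Int) (length : Int) =>
        motifs.foldl (fun acc2 motif =>
          if PySem.Str.isIn (PySem.Str.join "" ((PySem.List.pyRange 0 length 1).map (fun _ => base))) motif
          then acc2 ++ [length] else acc2) acc)
      = (fun acc length => acc ++
          ((motifs.filter (fun motif =>
              PySem.Str.isIn (PySem.Str.join "" ((PySem.List.pyRange 0 length 1).map (fun _ => base))) motif)).map
            (fun _ => length))) from by
    funext acc length
    exact PySem.List.foldl_append_if _ (fun _ => length) motifs acc]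
  rw [PySem.List.foldl_append_eq_flatMap]
  set lens : List Int := (PySem.List.pyRange 0 (maxLen + 1) 1).flatMap (fun length =>
      ((motifs.filter (fun motif =>
          PySem.Str.isIn (PySem.Str.join "" ((PySem.List.pyRange 0 length 1).map (fun _ => base))) motif)).map
        (fun _ => length))) with hlens
  -- membership characterisation of lens
  have hmem : ∀ y : Int, y ∈ lens ↔ 0 ≤ y ∧ y ≤ Best := by
    intro y
    constructor
    · intro hy
      rw [hlens] at hy
      rcases List.mem_flatMap.1 hy with ⟨L, hL, hyL⟩
      rcases List.mem_map.1 hyL with ⟨m, hmf, rfl⟩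
      rcases List.mem_filter.1 hmf with ⟨hmm, hisin⟩
      have hLr := PySem.List.mem_pyRange_one.1 hL
      refine ⟨hLr.1, ?_⟩
      -- isIn → L ≤ pvMR → L ≤ Best
      rw [PySem.Str.isIn_iff_infix, pvRun_toList c base hb L hLr.1, pvReplicate_infix_iff] at hisin
      have h2 := (PySem.List.le_foldl_max_int motifs (fun m => ((pvMR c m.toList : Int))) 0).2 m hmm
      have : (L.toNat : Int) ≤ (pvMR c m.toList : Int) := by exact_mod_cast hisin
      omega
    · rintro ⟨hy0, hyB⟩
      rw [hlens]
      apply List.mem_flatMap.2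
      refine ⟨y, PySem.List.mem_pyRange_one.2 ⟨hy0, by omega⟩, ?_⟩
      -- some motif attains Best ≥ y
      have hex : ∃ m ∈ motifs, y ≤ (pvMR c m.toList : Int) := by
        rcases pvFoldMax_attained c motifs 0 with h | ⟨m, hmm, h⟩
        · rcases motifs with _ | ⟨m, ms⟩
          · exact absurd rfl hm
          · refine ⟨m, by simp, ?_⟩
            have hpos : (0 : Int) ≤ (pvMR c m.toList : Int) := by positivity
            omega
        · exact ⟨m, hmm, by rw [← hBest] at h; omega⟩
      rcases hex with ⟨m, hmm, hle⟩
      apply List.mem_map.2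
      refine ⟨m, List.mem_filter.2 ⟨hmm, ?_⟩, rfl⟩
      rw [PySem.Str.isIn_iff_infix, pvRun_toList c base hb y hy0, pvReplicate_infix_iff]
      omega
  -- lens is nonempty, so max? returns its maximum, which is Best
  have hne : lens ≠ [] := by
    intro h
    have := (hmem Best).2 ⟨hBest0, le_rfl⟩
    rw [h] at this
    exact absurd this (List.not_mem_nil)
  rcases ho : PySem.List.max? lens (fun x => x) with _ | w
  · exact absurd ((PySem.List.max?_eq_none_iff _ _).1 ho) hne
  · have hw : w ∈ lens := PySem.List.max?_mem ho
    have h1 : w ≤ Best := ((hmem w).1 hw).2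
    have h2 : Best ≤ w := PySem.List.max?_isMax ho Best ((hmem Best).2 ⟨hBest0, le_rfl⟩)
    rw [List.nil_append, ho, Option.getD_some]
    omega

-- ===== VERDICT (by name: the statement is the Claim_ definition above) =====
theorem get_longest_run_spec : Claim_equal_get_longest_run := by
  intro motifs _ hpre
  unfold Spec_get_longest_run get_longest_run get_longest_run_alt
  have hmapne : motifs.map (fun i => PySem.Str.len i) ≠ [] := by
    simpa using hpre
  rcases ho : PySem.List.max? (motifs.map (fun i => PySem.Str.len i)) (fun x => x) with _ | maxLen
  · exact absurd ((PySem.List.max?_eq_none_iff _ _).1 ho) hmapne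
  · rw [PySem.Dict.items_foldl_insert_fresh (["A", "T", "C", "G"]) (fun a => a) _ PySem.Dict.empty
        (by intro a _; exact PySem.Dict.contains_empty a) (by decide)]
    have hempty : (PySem.Dict.empty : PySem.Dict String Int).items = [] := rfl
    rw [hempty, List.nil_append]
    simp only [List.map_cons, List.map_nil]
    refine congrArg₂ _ (congrArg _ ?_) (congrArg₂ _ (congrArg _ ?_) (congrArg₂ _ (congrArg _ ?_) (congrArg₂ _ (congrArg _ ?_) rfl))) <;>
      [ (exact (pvBase_eq motifs hpre maxLen ho 'A' "A" rfl).trans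
          (pvMotifFold 'A' "A" rfl motifs 0 le_rfl).symm);
        (exact (pvBase_eq motifs hpre maxLen ho 'T' "T" rfl).trans
          (pvMotifFold 'T' "T" rfl motifs 0 le_rfl).symm);
        (exact (pvBase_eq motifs hpre maxLen ho 'C' "C" rfl).trans
          (pvMotifFold 'C' "C" rfl motifs 0 le_rfl).symm);
        (exact (pvBase_eq motifs hpre maxLen ho 'G' "G" rfl).trans
          (pvMotifFold 'G' "G" rfl motifs 0 le_rfl).symm)]
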